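-- pv_equiv track=rewrite | github.com/HU-xiaobai/Code-of-Beyond-Prompting--An-Efficient-Embedding-Framework-for-Open-Domain-Question-Answering | data_utils.py | _amend
-- ===== SOURCE A (Python) =====
-- def _amend(text: str) -> str:
--     text = text.replace("\u2019", "'").replace("--", "_")
--
--     for special_word in ("don't", "ain't", "won't", "didn't", "can't", "doesn't", "wanna", "gonna", "gimme"):
--         if special_word in text:
--             if special_word.endswith("nna"):
--                 fixed = f"{special_word[:-len('na')]} na"
--             elif special_word.endswith("mme"):
--                 fixed = f"{special_word[:-len('me')]} me"
--             else:
--                 fixed = special_word[: -len("n't")] + " n't"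
--
--             text = text.replace(special_word, fixed)
--
--     return text
-- ===== SOURCE B (Python) =====
-- import re
--
-- _FIXES = {
--     "don't": "do n't", "ain't": "ai n't", "won't": "wo n't",
--     "didn't": "did n't", "can't": "ca n't", "doesn't": "does n't",
--     "wanna": "wan na", "gonna": "gon na", "gimme": "gim me",
-- }
-- _RX = re.compile("|".join(map(re.escape, _FIXES)))
--
--
-- def _amend(text: str) -> str:
--     text = text.replace("\u2019", "'").replace("--", "_")
--     return _RX.sub(lambda m: _FIXES[m.group()], text)
-- ===== Notes on version B (the rewrite author's own statement) =====
-- stated objective: idiomatic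
-- what changed: The nine per-word passes (in-check + branch + global replace each) are replaced by a precomputed word->fixed table and ONE left-to-right regex pass over the text that rewrites every match via the table.
-- outside the precondition, e.g. on _amend("wannain't"): A returns "wan nai n't", B returns "wan nain't"; on _amend("gonnain't"): A returns "gon nai n't", B returns "gon nain't"
import Mathlib
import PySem

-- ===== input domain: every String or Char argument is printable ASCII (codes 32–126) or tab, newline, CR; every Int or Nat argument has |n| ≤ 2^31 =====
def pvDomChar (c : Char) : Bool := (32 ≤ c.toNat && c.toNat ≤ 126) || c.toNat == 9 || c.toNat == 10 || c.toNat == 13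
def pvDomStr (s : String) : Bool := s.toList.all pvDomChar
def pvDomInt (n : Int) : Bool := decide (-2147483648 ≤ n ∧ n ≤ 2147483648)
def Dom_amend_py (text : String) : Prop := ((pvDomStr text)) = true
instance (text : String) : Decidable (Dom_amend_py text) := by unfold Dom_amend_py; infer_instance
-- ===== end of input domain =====

-- B replaces A's nine per-word replace passes by one precomputed word→fixed table and a single
-- left-to-right scan (regex alternation in Python) rewriting each match via the table (idiomatic).

-- ===== PORT A =====
def amendWords : List String :=
  ["don't", "ain't", "won't", "didn't", "can't", "doesn't", "wanna", "gonna", "gimme"]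

def amend_py (text : String) : String :=
  let text := PySem.Str.replace (PySem.Str.replace text "\u2019" "'") "--" "_"
  amendWords.foldl (fun cur w =>
    if PySem.Str.isIn w cur then
      let fixed :=
        if PySem.Str.endswith w "nna" then PySem.Str.slice w none (some (-2)) ++ " na"
        else if PySem.Str.endswith w "mme" then PySem.Str.slice w none (some (-2)) ++ " me"
        else PySem.Str.slice w none (some (-3)) ++ " n't"
      PySem.Str.replace cur w fixed
    else cur) text

-- ===== PORT B =====
def amendMap : List (List Char × List Char) :=
  [("don't".toList, "do n't".toList), ("ain't".toList, "ai n't".toList),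
   ("won't".toList, "wo n't".toList), ("didn't".toList, "did n't".toList),
   ("can't".toList, "ca n't".toList), ("doesn't".toList, "does n't".toList),
   ("wanna".toList, "wan na".toList), ("gonna".toList, "gon na".toList),
   ("gimme".toList, "gim me".toList)]

def amendFirstMatch (s : List Char) : Option (List Char × List Char) :=
  amendMap.find? (fun p => p.1.isPrefixOf s)

-- hand port of _RX.sub for a literal alternation: leftmost match wins, ties broken by listed order;
-- exact for this pattern of distinct literal words
def scanSub : List Char → List Char
  | [] => []
  | c :: t =>
    match amendFirstMatch (c :: t) with
    | some (w, _f) => _f ++ scanSub (t.drop (w.length - 1))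
    | none => c :: scanSub t
termination_by s => s.length
decreasing_by
  · simp only [List.length_cons, List.length_drop]; omega
  · simp only [List.length_cons]; omega

def amend_py_alt (text : String) : String :=
  let text := PySem.Str.replace (PySem.Str.replace text "\u2019" "'") "--" "_"
  String.ofList (scanSub text.toList)

-- ===== PRECONDITION & SPEC =====
-- Pre_ excludes texts containing "wannain't" or "gonnain't": there two special words overlap, and
-- A's word-by-word replacement order and B's single left-to-right pass are both defensible
-- resolutions of the overlap; no other inputs are excluded.
def Pre_amend_py (text : String) : Prop :=
  PySem.Str.isIn "wannain't" text = false ∧ PySem.Str.isIn "gonnain't" text = false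
instance (text : String) : Decidable (Pre_amend_py text) := by unfold Pre_amend_py; infer_instance
def pvWitness_amend_py : String := "I don't wanna go"

def Spec_amend_py (text : String) (out : String) : Prop := out = amend_py_alt text
instance (text : String) (out : String) : Decidable (Spec_amend_py text out) := by unfold Spec_amend_py; infer_instance

-- ===== CLAIM (what is proved, stated in full; the proofs are below) =====
def Claim_equal_amend_py : Prop := ∀ (text : String), Dom_amend_py text → Pre_amend_py text → Spec_amend_py text (amend_py text)

-- ===== LEMMAS AND PROOFS =====

-- left-to-right single-pattern replace, the semantics of Python's str.replace for nonempty old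
def repl (old new : List Char) : List Char → List Char
  | [] => []
  | c :: t =>
    if old.isPrefixOf (c :: t) then new ++ repl old new (t.drop (old.length - 1))
    else c :: repl old new t
termination_by s => s.length
decreasing_by
  · simp only [List.length_cons, List.length_drop]; omega
  · simp only [List.length_cons]; omega

def comb (L : List (List Char × List Char)) (s : List Char) : List Char :=
  L.foldl (fun s p => repl p.1 p.2 s) s

def badList : List (List Char) := ["wannain't".toList, "gonnain't".toList]

def NoBad (s : List Char) : Prop := ∀ b ∈ badList, ¬ b <:+: s

-- each pair of amendMap is a word split u++v with the fixed form u++' '::v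
def Shape (p : List Char × List Char) : Prop :=
  ∃ u v, p.1 = u ++ v ∧ p.2 = u ++ ' ' :: v ∧ u ≠ [] ∧ v ≠ [] ∧ ' ' ∉ p.1

theorem prefix_split {x a b : List Char} (h : x <+: a ++ b) :
    x <+: a ∨ ∃ y, x = a ++ y ∧ y <+: b := by
  rcases List.prefix_or_prefix_of_prefix h (List.prefix_append a b) with h1 | h2
  · exact Or.inl h1
  · obtain ⟨y, rfl⟩ := h2
    exact Or.inr ⟨y, rfl, (List.prefix_append_right_inj a).mp h⟩

theorem shape_amendMap : ∀ p ∈ amendMap, Shape p := by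
  intro p hp
  simp only [amendMap, List.mem_cons, List.not_mem_nil, or_false] at hp
  rcases hp with rfl | rfl | rfl | rfl | rfl | rfl | rfl | rfl | rfl
  · exact ⟨"do".toList, "n't".toList, by decide, by decide, by decide, by decide, by decide⟩
  · exact ⟨"ai".toList, "n't".toList, by decide, by decide, by decide, by decide, by decide⟩
  · exact ⟨"wo".toList, "n't".toList, by decide, by decide, by decide, by decide, by decide⟩
  · exact ⟨"did".toList, "n't".toList, by decide, by decide, by decide, by decide, by decide⟩
  · exact ⟨"ca".toList, "n't".toList, by decide, by decide, by decide, by decide, by decide⟩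
  · exact ⟨"does".toList, "n't".toList, by decide, by decide, by decide, by decide, by decide⟩
  · exact ⟨"wan".toList, "na".toList, by decide, by decide, by decide, by decide, by decide⟩
  · exact ⟨"gon".toList, "na".toList, by decide, by decide, by decide, by decide, by decide⟩
  · exact ⟨"gim".toList, "me".toList, by decide, by decide, by decide, by decide, by decide⟩

theorem fact_noprefix : ∀ p ∈ amendMap, ∀ q ∈ amendMap, p.1 = q.1 ∨ ¬ p.1 <+: q.1 := by decide

theorem fact_nodup : (amendMap.map Prod.fst).Nodup := by decide

theorem fact_len : ∀ p ∈ amendMap, p.1.length ≤ 7 := by decide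

theorem fact_inner : ∀ p ∈ amendMap, ∀ q ∈ amendMap, ∀ j < 7, 0 < j → ¬ p.1 <+: q.1.drop j := by decide

theorem fact_overlap : ∀ p ∈ amendMap, ∀ q ∈ amendMap, ∀ j < 7, 0 < j → j < q.1.length →
    q.1.drop j <+: p.1 → (q.1.take j ++ p.1) ∈ badList := by decide

-- repl bridges
theorem replace_go_eq (old new : List Char) (h : old ≠ []) :
    ∀ (fuel : Nat) (l acc : List Char), l.length ≤ fuel →
      PySem.Chars.replace.go old new fuel l acc = acc.reverse ++ repl old new l := by
  intro fuel
  induction fuel with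
  | zero =>
    intro l acc hle
    have hl : l = [] := List.eq_nil_of_length_eq_zero (Nat.le_zero.mp hle)
    subst hl
    rw [PySem.Chars.replace.go.eq_def]
    simp [repl]
  | succ fuel ih =>
    intro l acc hle
    match l with
    | [] => rw [PySem.Chars.replace.go.eq_def]; simp [repl]
    | c :: t =>
      rw [PySem.Chars.replace.go.eq_def]
      simp only []
      by_cases hp : old.isPrefixOf (c :: t)
      · rw [if_pos hp]
        obtain ⟨d, old', rfl⟩ : ∃ d old', old = d :: old' := by
          cases old with
          | nil => exact absurd rfl h
          | cons d old' => exact ⟨d, old', rfl⟩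
        have hdrop : List.drop (d :: old').length (c :: t) = t.drop ((d :: old').length - 1) := by
          simp [List.length_cons]
        have hlen : (t.drop ((d :: old').length - 1)).length ≤ fuel := by
          simp only [List.length_drop]
          simp only [List.length_cons] at hle
          omega
        rw [hdrop, ih _ _ hlen, repl, if_pos hp]
        simp
      · rw [if_neg hp]
        have hlen : t.length ≤ fuel := by simp only [List.length_cons] at hle; omega
        rw [ih _ _ hlen, repl, if_neg hp]
        simp

theorem repl_eq_chars_replace (old new s : List Char) (h : old ≠ []) :
    PySem.Chars.replace s old new = repl old new s := by
  have hemp : old.isEmpty = false := by cases old <;> simp_all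
  rw [PySem.Chars.replace, if_neg (by simp [hemp]), replace_go_eq old new h s.length s [] le_rfl]
  simp

theorem repl_id (old new s : List Char) (h : old ≠ []) (hni : ¬ old <:+: s) :
    repl old new s = s := by
  induction s with
  | nil => rw [repl]
  | cons c t ih =>
    rw [repl, if_neg]
    · rw [ih (fun hi => hni (List.infix_cons_iff.mpr (Or.inr hi)))]
    · intro hp
      exact hni ((List.isPrefixOf_iff_prefix.mp hp).isInfix)

-- a space-free prefix of the output of repl (for a Shape pair) was already a prefix of the input
theorem nopfx {old new : List Char} (hs : Shape (old, new)) {x : List Char} (hx : ' ' ∉ x) :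
    ∀ s, x <+: repl old new s → x <+: s := by
  obtain ⟨u, v, hold, hnew, hu, hv, hsp⟩ := hs
  simp only at hnew hold
  have main : ∀ (n : Nat) (s x : List Char), ' ' ∉ x → s.length ≤ n →
      x <+: repl old new s → x <+: s := by
    intro n
    induction n with
    | zero =>
      intro s x hx hle h
      have hs0 : s = [] := List.eq_nil_of_length_eq_zero (Nat.le_zero.mp hle)
      subst hs0; rwa [repl] at h
    | succ n ih =>
      intro s x hx hle h
      match s with
      | [] => rwa [repl] at h
      | c :: t =>
        rw [repl] at h
        by_cases hp : old.isPrefixOf (c :: t)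
        · rw [if_pos hp] at h
          rw [hnew, List.append_assoc, List.cons_append] at h
          rcases prefix_split h with hxu | ⟨y, rfl, hy⟩
          · exact hxu.trans ((hold ▸ List.prefix_append u v).trans (List.isPrefixOf_iff_prefix.mp hp))
          · cases y with
            | nil =>
              have hxu : u ++ ([] : List Char) <+: u := by simp
              exact hxu.trans ((hold ▸ List.prefix_append u v).trans (List.isPrefixOf_iff_prefix.mp hp))
            | cons d y' =>
              have hd : d = ' ' := (List.cons_prefix_cons.mp hy).1
              exact absurd (by simp [hd]) hx
        · rw [if_neg hp] at h
          cases x with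
          | nil => exact List.nil_prefix
          | cons e x' =>
            obtain ⟨he, hx'⟩ := List.cons_prefix_cons.mp h
            have hxm : ' ' ∉ x' := fun hm => hx (List.mem_cons_of_mem _ hm)
            have hlt : t.length ≤ n := by simp only [List.length_cons] at hle; omega
            exact List.cons_prefix_cons.mpr ⟨he, ih t x' hxm hlt hx'⟩
  exact fun s => main s.length s x hx le_rfl

theorem chain {L : List (List Char × List Char)} (hL : ∀ p ∈ L, Shape p)
    {x : List Char} (hx : ' ' ∉ x) : ∀ s, x <+: comb L s → x <+: s := by
  induction L with
  | nil => intro s h; exact h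
  | cons p L' ih =>
    intro s h
    have h1 : x <+: repl p.1 p.2 s :=
      ih (fun q hq => hL q (List.mem_cons_of_mem _ hq)) _ h
    exact nopfx (hL p (List.mem_cons_self ..)) hx s h1

theorem walk (old new : List Char) : ∀ (u X : List Char),
    (∀ j < u.length, ¬ old <+: (u ++ X).drop j) →
    repl old new (u ++ X) = u ++ repl old new X := by
  intro u
  induction u with
  | nil => intro X h; simp
  | cons c u' ih =>
    intro X h
    have h0 : ¬ old <+: (c :: u') ++ X := by simpa using h 0 (by simp)
    rw [List.cons_append, repl, if_neg (fun hp => h0 (by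
      rw [List.cons_append]
      exact List.isPrefixOf_iff_prefix.mp hp))]
    rw [ih X (fun j hj => by
      have := h (j + 1) (by simp only [List.length_cons]; omega)
      simpa using this)]
    simp

theorem shape_ne_nil {p : List Char × List Char} (hs : Shape p) : p.1 ≠ [] := by
  obtain ⟨u, v, hold, _, hu, _, _⟩ := hs
  rw [hold]
  simp [hu]

theorem shape_spacefree {p : List Char × List Char} (hs : Shape p) : ' ' ∉ p.1 := by
  obtain ⟨_, _, _, _, _, _, hsp⟩ := hs
  exact hsp

theorem comb_cons : ∀ (L : List (List Char × List Char)), (∀ p ∈ L, Shape p) →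
    ∀ (c : Char) (t : List Char), (∀ p ∈ L, ¬ p.1 <+: c :: t) →
    comb L (c :: t) = c :: comb L t := by
  intro L
  induction L with
  | nil => intro _ c t _; rfl
  | cons p L' ih =>
    intro hL c t hnp
    have hLs' : ∀ q ∈ L', Shape q := fun q hq => hL q (List.mem_cons_of_mem _ hq)
    have hp : ¬ p.1 <+: c :: t := hnp p (List.mem_cons_self ..)
    have hrepl : repl p.1 p.2 (c :: t) = c :: repl p.1 p.2 t := by
      rw [repl, if_neg (fun hip => hp (List.isPrefixOf_iff_prefix.mp hip))]
    show comb L' (repl p.1 p.2 (c :: t)) = c :: comb L' (repl p.1 p.2 t)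
    rw [hrepl]
    exact ih hLs' c (repl p.1 p.2 t) (fun q hq hqp => by
      cases hq1 : q.1 with
      | nil => exact shape_ne_nil (hLs' q hq) hq1
      | cons e y =>
        rw [hq1] at hqp
        obtain ⟨he, hy⟩ := List.cons_prefix_cons.mp hqp
        have hysp : ' ' ∉ y := fun hm => shape_spacefree (hLs' q hq) (hq1 ▸ List.mem_cons_of_mem _ hm)
        have : y <+: t := nopfx (by rw [← Prod.mk.eta (p := p)] at hL; exact hL p (List.mem_cons_self ..)) hysp t hy
        exact hnp q (List.mem_cons_of_mem _ hq) (hq1 ▸ List.cons_prefix_cons.mpr ⟨he, this⟩))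

theorem comb_nil : ∀ (L : List (List Char × List Char)), comb L [] = [] := by
  intro L
  induction L with
  | nil => rfl
  | cons p L' ih => show comb L' (repl p.1 p.2 []) = []; rw [repl]; exact ih

theorem no_match_inside {w f : List Char} (hw : (w, f) ∈ amendMap)
    {q : List Char × List Char} (hq : q ∈ amendMap) (X0 X : List Char)
    (hnb : NoBad (w ++ X0)) (hInv : ∀ y, ' ' ∉ y → y <+: X → y <+: X0)
    (hq0 : ¬ q.1 <+: w ++ X0 ∨ q.1 ≠ w) :
    ∀ j < w.length, ¬ q.1 <+: (w ++ X).drop j := by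
  intro j hj hqp
  rw [List.drop_append_of_le_length (le_of_lt hj)] at hqp
  rcases prefix_split hqp with h1 | ⟨y, hqy, hy⟩
  · rcases Nat.eq_zero_or_pos j with hj0 | hpos
    · subst hj0
      simp only [List.drop_zero] at h1
      rcases hq0 with hq0 | hq0
      · exact hq0 (h1.trans (List.prefix_append w X0))
      · rcases fact_noprefix q hq (w, f) hw with he | hnp
        · exact hq0 he
        · exact hnp h1
    · exact fact_inner q hq (w, f) hw j (lt_of_lt_of_le hj (fact_len _ hw)) hpos h1
  · have hsp : ' ' ∉ y := fun hm =>
      shape_spacefree (shape_amendMap q hq) (hqy ▸ List.mem_append_right _ hm)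
    have hyX0 : y <+: X0 := hInv y hsp hy
    rcases Nat.eq_zero_or_pos j with hj0 | hpos
    · subst hj0
      simp only [List.drop_zero] at hqy
      rcases hq0 with hq0 | hq0
      · exact hq0 (hqy ▸ (List.prefix_append_right_inj w).mpr hyX0)
      · cases y with
        | nil => exact hq0 (by simpa using hqy)
        | cons d y' =>
          rcases fact_noprefix (w, f) hw q hq with he | hnp
          · exact hq0 he.symm
          · exact hnp ⟨d :: y', hqy.symm⟩
    · have hmem : (w.take j ++ q.1) ∈ badList :=
        fact_overlap q hq (w, f) hw j (lt_of_lt_of_le hj (fact_len _ hw)) hpos hj ⟨y, hqy.symm⟩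
      have heq : w.take j ++ q.1 = w ++ y := by
        rw [hqy, ← List.append_assoc, List.take_append_drop]
      have hinf : (w.take j ++ q.1) <:+: w ++ X0 := by
        rw [heq]
        exact ((List.prefix_append_right_inj w).mpr hyX0).isInfix
      exact hnb _ hmem hinf

theorem comb_walk {w f : List Char} (hw : (w, f) ∈ amendMap) (X0 : List Char)
    (hnb : NoBad (w ++ X0)) :
    ∀ (L : List (List Char × List Char)) (X : List Char), (∀ p ∈ L, p ∈ amendMap) →
    (∀ p ∈ L, ¬ p.1 <+: w ++ X0 ∨ p.1 ≠ w) →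
    (∀ y, ' ' ∉ y → y <+: X → y <+: X0) →
    comb L (w ++ X) = w ++ comb L X := by
  intro L
  induction L with
  | nil => intro X _ _ _; rfl
  | cons p L' ih =>
    intro X hmem hq0 hInv
    have hstep : repl p.1 p.2 (w ++ X) = w ++ repl p.1 p.2 X :=
      walk p.1 p.2 w X (no_match_inside hw (hmem p (List.mem_cons_self ..)) X0 X hnb hInv
        (hq0 p (List.mem_cons_self ..)))
    show comb L' (repl p.1 p.2 (w ++ X)) = w ++ comb L' (repl p.1 p.2 X)
    rw [hstep]
    exact ih (repl p.1 p.2 X)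
      (fun q hq => hmem q (List.mem_cons_of_mem _ hq))
      (fun q hq => hq0 q (List.mem_cons_of_mem _ hq))
      (fun y hysp hy => hInv y hysp
        (nopfx (by rw [Prod.mk.eta]; exact shape_amendMap p (hmem p (List.mem_cons_self ..))) hysp X hy))

theorem no_match_inside_f {w f : List Char} (hwf : (w, f) ∈ amendMap)
    {q : List Char × List Char} (hq : q ∈ amendMap) (X0 X : List Char)
    (hnb : NoBad (w ++ X0)) (hInv : ∀ y, ' ' ∉ y → y <+: X → y <+: X0)
    (hqw : q.1 ≠ w) :
    ∀ j < f.length, ¬ q.1 <+: (f ++ X).drop j := by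
  obtain ⟨u, v, hwuv, hfuv, hu, hv, hsp⟩ := shape_amendMap (w, f) hwf
  simp only at hwuv hfuv
  intro j hj hqp
  -- a helper closing the goal from q.1 <+: w.drop j' with j' < w.length
  have inner : ∀ j', j' < w.length → q.1 <+: w.drop j' → False := by
    intro j' hj' h1
    rcases Nat.eq_zero_or_pos j' with hj0 | hpos
    · subst hj0
      simp only [List.drop_zero] at h1
      rcases fact_noprefix q hq (w, f) hwf with he | hnp
      · exact hqw he
      · exact hnp h1
    · exact fact_inner q hq (w, f) hwf j' (lt_of_lt_of_le hj' (fact_len _ hwf)) hpos h1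
  have spans : ∀ j' y, 0 < j' → j' < w.length → q.1 = w.drop j' ++ y → y <+: X → False := by
    intro j' y hpos hj' hqy hy
    have hysp : ' ' ∉ y := fun hm =>
      shape_spacefree (shape_amendMap q hq) (hqy ▸ List.mem_append_right _ hm)
    have hyX0 : y <+: X0 := hInv y hysp hy
    have hmem : (w.take j' ++ q.1) ∈ badList :=
      fact_overlap q hq (w, f) hwf j' (lt_of_lt_of_le hj' (fact_len _ hwf)) hpos hj' ⟨y, hqy.symm⟩
    have heq : w.take j' ++ q.1 = w ++ y := by
      rw [hqy, ← List.append_assoc, List.take_append_drop]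
    exact hnb _ hmem (heq ▸ ((List.prefix_append_right_inj w).mpr hyX0).isInfix)
  have hflen : f.length = u.length + 1 + v.length := by simp [hfuv]; omega
  by_cases hju : j ≤ u.length
  · have hdrop : (f ++ X).drop j = u.drop j ++ (' ' :: (v ++ X)) := by
      rw [hfuv, List.append_assoc, List.cons_append, List.drop_append_of_le_length hju]
    rw [hdrop] at hqp
    have hwdrop : w.drop j = u.drop j ++ v := by
      rw [hwuv, List.drop_append_of_le_length hju]
    have hjw : j < w.length := by
      rw [hwuv, List.length_append]
      have := List.length_pos_iff.mpr hv
      omega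
    rcases prefix_split hqp with h1 | ⟨y, hqy, hy⟩
    · exact inner j hjw (hwdrop ▸ h1.trans (List.prefix_append _ v))
    · cases y with
      | nil =>
        have : q.1 <+: w.drop j := by
          rw [hqy, List.append_nil, hwdrop]
          exact List.prefix_append _ v
        exact inner j hjw this
      | cons d y' =>
        have hd : d = ' ' := (List.cons_prefix_cons.mp hy).1
        exact shape_spacefree (shape_amendMap q hq) (hqy ▸ List.mem_append_right _ (by simp [hd]))
  · push_neg at hju
    set m := j - u.length - 1 with hm
    have hmv : m < v.length := by omega
    have hdrop : (f ++ X).drop j = v.drop m ++ X := by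
      rw [hfuv, List.append_assoc, List.cons_append, List.drop_append,
        List.drop_of_length_le (by omega), List.nil_append,
        show j - u.length = m + 1 by omega, List.drop_succ_cons]
      exact List.drop_append_of_le_length (le_of_lt hmv)
    rw [hdrop] at hqp
    have hvw : v.drop m = w.drop (u.length + m) := by
      rw [hwuv, List.drop_append, List.drop_of_length_le (l := u) (by omega), List.nil_append]
      congr 1
      omega
    have hj' : u.length + m < w.length := by
      rw [hwuv, List.length_append]; omega
    have hpos : 0 < u.length + m := by
      have := List.length_pos_iff.mpr hu
      omega
    rcases prefix_split hqp with h1 | ⟨y, hqy, hy⟩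
    · exact inner (u.length + m) hj' (hvw ▸ h1)
    · exact spans (u.length + m) y hpos hj' (hvw ▸ hqy) hy

theorem comb_walk_f {w f : List Char} (hwf : (w, f) ∈ amendMap) (X0 : List Char)
    (hnb : NoBad (w ++ X0)) :
    ∀ (L : List (List Char × List Char)) (X : List Char), (∀ p ∈ L, p ∈ amendMap) →
    (∀ p ∈ L, p.1 ≠ w) →
    (∀ y, ' ' ∉ y → y <+: X → y <+: X0) →
    comb L (f ++ X) = f ++ comb L X := by
  intro L
  induction L with
  | nil => intro X _ _ _; rfl
  | cons p L' ih =>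
    intro X hmem hq0 hInv
    have hstep : repl p.1 p.2 (f ++ X) = f ++ repl p.1 p.2 X :=
      walk p.1 p.2 f X (no_match_inside_f hwf (hmem p (List.mem_cons_self ..)) X0 X hnb hInv
        (hq0 p (List.mem_cons_self ..)))
    show comb L' (repl p.1 p.2 (f ++ X)) = f ++ comb L' (repl p.1 p.2 X)
    rw [hstep]
    exact ih (repl p.1 p.2 X)
      (fun q hq => hmem q (List.mem_cons_of_mem _ hq))
      (fun q hq => hq0 q (List.mem_cons_of_mem _ hq))
      (fun y hysp hy => hInv y hysp
        (nopfx (by rw [Prod.mk.eta]; exact shape_amendMap p (hmem p (List.mem_cons_self ..))) hysp X hy))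

theorem comb_append_split (L1 L2 : List (List Char × List Char))
    (p : List Char × List Char) (s : List Char) :
    comb (L1 ++ p :: L2) s = comb L2 (repl p.1 p.2 (comb L1 s)) := by
  simp [comb, List.foldl_append]

theorem comb_eq_scan : ∀ s, NoBad s → comb amendMap s = scanSub s := by
  have main : ∀ (n : Nat) (s : List Char), s.length ≤ n → NoBad s →
      comb amendMap s = scanSub s := by
    intro n
    induction n with
    | zero =>
      intro s hle hnb
      have hs0 : s = [] := List.eq_nil_of_length_eq_zero (Nat.le_zero.mp hle)
      subst hs0
      rw [scanSub, comb_nil]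
    | succ n ih =>
      intro s hle hnb
      match s with
      | [] => rw [scanSub, comb_nil]
      | c :: t =>
        rw [scanSub]
        cases hfm : amendFirstMatch (c :: t) with
        | none =>
          simp only [hfm]
          have hnone : ∀ p ∈ amendMap, ¬ p.1 <+: c :: t := by
            intro p hp hpre
            have h0 : amendMap.find? (fun p => p.1.isPrefixOf (c :: t)) = none := hfm
            have := List.find?_eq_none.mp h0 p hp
            exact this (List.isPrefixOf_iff_prefix.mpr hpre)
          rw [comb_cons amendMap shape_amendMap c t hnone]
          congr 1
          exact ih t (by simp only [List.length_cons] at hle; omega)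
            (fun b hb hbi => hnb b hb (List.infix_cons_iff.mpr (Or.inr hbi)))
        | some p =>
          obtain ⟨w, f⟩ := p
          simp only [hfm]
          have hfm' : amendMap.find? (fun p => p.1.isPrefixOf (c :: t)) = some (w, f) := hfm
          obtain ⟨hPw, L1, L2, hsplit, hL1⟩ := List.find?_eq_some_iff_append.mp hfm'
          have hwpre : w <+: c :: t := List.isPrefixOf_iff_prefix.mp hPw
          obtain ⟨X0, hX0⟩ := hwpre
          have hmemwf : (w, f) ∈ amendMap := by
            rw [hsplit]; exact List.mem_append_right _ (List.mem_cons_self ..)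
          have hwne : w ≠ [] := shape_ne_nil (shape_amendMap (w, f) hmemwf)
          have hX0' : t.drop (w.length - 1) = X0 := by
            cases w with
            | nil => exact absurd rfl hwne
            | cons d w' =>
              have ht : w' ++ X0 = t := by
                rw [List.cons_append] at hX0
                exact (List.cons.injEq .. ▸ hX0 : _ ∧ _).2
              rw [← ht, List.length_cons, Nat.add_sub_cancel, List.drop_left]
          have hnb' : NoBad (w ++ X0) := by rw [hX0]; exact hnb
          have hmemL1 : ∀ p ∈ L1, p ∈ amendMap := fun p hp => by
            rw [hsplit]; exact List.mem_append_left _ hp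
          have hmemL2 : ∀ p ∈ L2, p ∈ amendMap := fun p hp => by
            rw [hsplit]; exact List.mem_append_right _ (List.mem_cons_of_mem _ hp)
          have hL1' : ∀ p ∈ L1, ¬ p.1 <+: w ++ X0 ∨ p.1 ≠ w := by
            intro p hp
            refine Or.inl ?_
            rw [hX0]
            intro hpre
            have := hL1 p hp
            rw [Bool.not_eq_eq_eq_not, Bool.not_true] at this
            rw [List.isPrefixOf_iff_prefix.mpr hpre] at this
            exact Bool.true_eq_false.mp this
          have hL2ne : ∀ p ∈ L2, p.1 ≠ w := by
            have hnd := fact_nodup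
            rw [hsplit, List.map_append, List.map_cons] at hnd
            have hnd2 := hnd.of_append_right
            have hwnm : w ∉ L2.map Prod.fst := (List.nodup_cons.mp hnd2).1
            intro p hp hpe
            exact hwnm (hpe ▸ List.mem_map_of_mem hp)
          have e1 : comb L1 (w ++ X0) = w ++ comb L1 X0 :=
            comb_walk hmemwf X0 hnb' L1 X0 hmemL1 hL1' (fun _ _ hy => hy)
          have e2 : repl w f (w ++ comb L1 X0) = f ++ repl w f (comb L1 X0) := by
            cases w with
            | nil => exact absurd rfl hwne
            | cons d w' =>
              rw [List.cons_append, repl, if_pos (List.isPrefixOf_iff_prefix.mpr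
                (by rw [← List.cons_append]; exact List.prefix_append _ _))]
              rw [List.length_cons, Nat.add_sub_cancel, List.drop_left]
          have e3 : comb L2 (f ++ repl w f (comb L1 X0)) = f ++ comb L2 (repl w f (comb L1 X0)) :=
            comb_walk_f hmemwf X0 hnb' L2 _ hmemL2 hL2ne (fun y hysp hy =>
              chain (fun p hp => shape_amendMap p (hmemL1 p hp)) hysp X0
                (nopfx (shape_amendMap (w, f) hmemwf) hysp _ hy))
          have hX0nb : NoBad X0 := fun b hb hbi => hnb b hb (by
            rw [← hX0]
            exact hbi.trans (List.suffix_append w X0).isInfix)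
          have hX0len : X0.length ≤ n := by
            have hlen := congrArg List.length hX0
            simp only [List.length_append, List.length_cons] at hlen
            have hwl : 0 < w.length := List.length_pos_iff.mpr hwne
            simp only [List.length_cons] at hle
            omega
          calc comb amendMap (c :: t)
              = comb (L1 ++ (w, f) :: L2) (w ++ X0) := by rw [hsplit, hX0]
            _ = comb L2 (repl w f (comb L1 (w ++ X0))) := comb_append_split ..
            _ = f ++ comb L2 (repl w f (comb L1 X0)) := by rw [e1, e2, e3]
            _ = f ++ comb (L1 ++ (w, f) :: L2) X0 := by rw [comb_append_split]
            _ = f ++ comb amendMap X0 := by rw [← hsplit]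
            _ = f ++ scanSub X0 := by rw [ih X0 hX0len hX0nb]
            _ = f ++ scanSub (t.drop (w.length - 1)) := by rw [hX0']
  exact fun s => main s.length s le_rfl

theorem stepA (w fx cur : String) (hw : w.toList ≠ []) :
    (if PySem.Str.isIn w cur then PySem.Str.replace cur w fx else cur)
      = String.ofList (repl w.toList fx.toList cur.toList) := by
  by_cases hin : PySem.Str.isIn w cur = true
  · rw [if_pos hin, PySem.Str.replace, repl_eq_chars_replace _ _ _ hw]
  · rw [if_neg hin, repl_id _ _ _ hw (fun hinf => hin ((PySem.Str.isIn_iff_infix w cur).mpr hinf))]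
    exact String.ofList_toList.symm

theorem afold_eq (s : String) :
    (amendWords.foldl (fun cur w =>
      if PySem.Str.isIn w cur then
        let fixed :=
          if PySem.Str.endswith w "nna" then PySem.Str.slice w none (some (-2)) ++ " na"
          else if PySem.Str.endswith w "mme" then PySem.Str.slice w none (some (-2)) ++ " me"
          else PySem.Str.slice w none (some (-3)) ++ " n't"
        PySem.Str.replace cur w fixed
      else cur) s) = String.ofList (comb amendMap s.toList) := by
  have hf1 : (if PySem.Str.endswith "don't" "nna" then PySem.Str.slice "don't" none (some (-2)) ++ " na"
      else if PySem.Str.endswith "don't" "mme" then PySem.Str.slice "don't" none (some (-2)) ++ " me"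
      else PySem.Str.slice "don't" none (some (-3)) ++ " n't") = "do n't" := by decide
  have hf2 : (if PySem.Str.endswith "ain't" "nna" then PySem.Str.slice "ain't" none (some (-2)) ++ " na"
      else if PySem.Str.endswith "ain't" "mme" then PySem.Str.slice "ain't" none (some (-2)) ++ " me"
      else PySem.Str.slice "ain't" none (some (-3)) ++ " n't") = "ai n't" := by decide
  have hf3 : (if PySem.Str.endswith "won't" "nna" then PySem.Str.slice "won't" none (some (-2)) ++ " na"
      else if PySem.Str.endswith "won't" "mme" then PySem.Str.slice "won't" none (some (-2)) ++ " me"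
      else PySem.Str.slice "won't" none (some (-3)) ++ " n't") = "wo n't" := by decide
  have hf4 : (if PySem.Str.endswith "didn't" "nna" then PySem.Str.slice "didn't" none (some (-2)) ++ " na"
      else if PySem.Str.endswith "didn't" "mme" then PySem.Str.slice "didn't" none (some (-2)) ++ " me"
      else PySem.Str.slice "didn't" none (some (-3)) ++ " n't") = "did n't" := by decide
  have hf5 : (if PySem.Str.endswith "can't" "nna" then PySem.Str.slice "can't" none (some (-2)) ++ " na"
      else if PySem.Str.endswith "can't" "mme" then PySem.Str.slice "can't" none (some (-2)) ++ " me"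
      else PySem.Str.slice "can't" none (some (-3)) ++ " n't") = "ca n't" := by decide
  have hf6 : (if PySem.Str.endswith "doesn't" "nna" then PySem.Str.slice "doesn't" none (some (-2)) ++ " na"
      else if PySem.Str.endswith "doesn't" "mme" then PySem.Str.slice "doesn't" none (some (-2)) ++ " me"
      else PySem.Str.slice "doesn't" none (some (-3)) ++ " n't") = "does n't" := by decide
  have hf7 : (if PySem.Str.endswith "wanna" "nna" then PySem.Str.slice "wanna" none (some (-2)) ++ " na"
      else if PySem.Str.endswith "wanna" "mme" then PySem.Str.slice "wanna" none (some (-2)) ++ " me"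
      else PySem.Str.slice "wanna" none (some (-3)) ++ " n't") = "wan na" := by decide
  have hf8 : (if PySem.Str.endswith "gonna" "nna" then PySem.Str.slice "gonna" none (some (-2)) ++ " na"
      else if PySem.Str.endswith "gonna" "mme" then PySem.Str.slice "gonna" none (some (-2)) ++ " me"
      else PySem.Str.slice "gonna" none (some (-3)) ++ " n't") = "gon na" := by decide
  have hf9 : (if PySem.Str.endswith "gimme" "nna" then PySem.Str.slice "gimme" none (some (-2)) ++ " na"
      else if PySem.Str.endswith "gimme" "mme" then PySem.Str.slice "gimme" none (some (-2)) ++ " me"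
      else PySem.Str.slice "gimme" none (some (-3)) ++ " n't") = "gim me" := by decide
  simp only [amendWords, List.foldl_cons, List.foldl_nil, hf1, hf2, hf3, hf4, hf5, hf6, hf7, hf8, hf9]
  rw [stepA "don't" "do n't" _ (by decide), stepA "ain't" "ai n't" _ (by decide),
    stepA "won't" "wo n't" _ (by decide), stepA "didn't" "did n't" _ (by decide),
    stepA "can't" "ca n't" _ (by decide), stepA "doesn't" "does n't" _ (by decide),
    stepA "wanna" "wan na" _ (by decide), stepA "gonna" "gon na" _ (by decide),
    stepA "gimme" "gim me" _ (by decide)]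
  simp only [String.toList_ofList]
  rfl

theorem dash_pres : ∀ (n : Nat) (s x : List Char), s.length ≤ n → '-' ∉ x → '_' ∉ x →
    (x <+: repl ['-', '-'] ['_'] s → x <+: s) ∧ (x <:+: repl ['-', '-'] ['_'] s → x <:+: s) := by
  intro n
  induction n with
  | zero =>
    intro s x hle _ _
    have hs0 : s = [] := List.eq_nil_of_length_eq_zero (Nat.le_zero.mp hle)
    subst hs0
    rw [repl]
    exact ⟨id, id⟩
  | succ n ih =>
    intro s x hle hx1 hx2
    match s with
    | [] => rw [repl]; exact ⟨id, id⟩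
    | c :: t =>
      rw [repl]
      have hlt : t.length ≤ n := by simp only [List.length_cons] at hle; omega
      by_cases hp : ['-', '-'].isPrefixOf (c :: t)
      · rw [if_pos hp]
        have hdl : (t.drop (['-', '-'].length - 1)).length ≤ n := by
          simp only [List.length_drop]; omega
        have hds : t.drop (['-', '-'].length - 1) <:+ t := List.drop_suffix _ t
        constructor
        · intro h
          cases x with
          | nil => exact List.nil_prefix
          | cons e x' =>
            have he : e = '_' := (List.cons_prefix_cons.mp h).1
            exact absurd (by simp [he]) hx2
        · intro h
          rcases List.infix_cons_iff.mp h with h1 | h2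
          · cases x with
            | nil => exact List.nil_infix
            | cons e x' =>
              have he : e = '_' := (List.cons_prefix_cons.mp h1).1
              exact absurd (by simp [he]) hx2
          · have := (ih _ x hdl hx1 hx2).2 h2
            exact List.infix_cons_iff.mpr (Or.inr (this.trans hds.isInfix))
      · rw [if_neg hp]
        constructor
        · intro h
          cases x with
          | nil => exact List.nil_prefix
          | cons e x' =>
            obtain ⟨he, hx'⟩ := List.cons_prefix_cons.mp h
            have h1 : '-' ∉ x' := fun hm => hx1 (List.mem_cons_of_mem _ hm)
            have h2 : '_' ∉ x' := fun hm => hx2 (List.mem_cons_of_mem _ hm)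
            exact List.cons_prefix_cons.mpr ⟨he, (ih t x' hlt h1 h2).1 hx'⟩
        · intro h
          rcases List.infix_cons_iff.mp h with h1 | h2
          · cases x with
            | nil => exact List.nil_infix
            | cons e x' =>
              obtain ⟨he, hx'⟩ := List.cons_prefix_cons.mp h1
              have h1' : '-' ∉ x' := fun hm => hx1 (List.mem_cons_of_mem _ hm)
              have h2' : '_' ∉ x' := fun hm => hx2 (List.mem_cons_of_mem _ hm)
              exact (List.cons_prefix_cons.mpr ⟨he, (ih t x' hlt h1' h2').1 hx'⟩).isInfix
          · exact List.infix_cons_iff.mpr (Or.inr ((ih t x hlt hx1 hx2).2 h2))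

theorem nobad_post (text : String) (hdom : Dom_amend_py text) (hpre : Pre_amend_py text) :
    NoBad (PySem.Str.replace (PySem.Str.replace text "\u2019" "'") "--" "_").toList := by
  intro b hb hbi
  rw [PySem.Str.toList_replace, PySem.Str.toList_replace] at hbi
  have hid : PySem.Chars.replace text.toList "\u2019".toList "'".toList = text.toList := by
    rw [repl_eq_chars_replace _ _ _ (by decide)]
    apply repl_id _ _ _ (by decide)
    intro hinf
    have hm : '\u2019' ∈ text.toList := hinf.subset (by decide)
    have hall := List.all_eq_true.mp hdom _ hm
    exact absurd hall (by decide)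
  rw [hid, repl_eq_chars_replace _ _ _ (by decide)] at hbi
  have hbl : '-' ∉ b ∧ '_' ∉ b := by
    simp only [badList, List.mem_cons, List.not_mem_nil, or_false] at hb
    rcases hb with rfl | rfl <;> exact ⟨by decide, by decide⟩
  have hbt : b <:+: text.toList :=
    (dash_pres text.toList.length text.toList b le_rfl hbl.1 hbl.2).2
      (by simpa using hbi)
  obtain ⟨hp1, hp2⟩ := hpre
  simp only [badList, List.mem_cons, List.not_mem_nil, or_false] at hb
  rcases hb with rfl | rfl
  · rw [PySem.Str.isIn_eq] at hp1
    exact absurd hbt ((PySem.Chars.isIn_eq_false_iff _ _).mp hp1)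
  · rw [PySem.Str.isIn_eq] at hp2
    exact absurd hbt ((PySem.Chars.isIn_eq_false_iff _ _).mp hp2)

-- ===== VERDICT (by name: the statement is the Claim_ definition above) =====
theorem amend_py_spec : Claim_equal_amend_py := by
  intro text hdom hpre
  unfold Spec_amend_py amend_py amend_py_alt
  rw [afold_eq, comb_eq_scan _ (nobad_post text hdom hpre)]
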